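-- pv_equiv track=rewrite | github.com/N-Divyasree/20_Days-Training | 13_05_25.py | longest_consecutive_in_place
-- ===== SOURCE A (Python) =====
-- def longest_consecutive_in_place(arr):
--     maxi = 1
--     curr= 1
--     for i in range(1, len(arr)):
--         if arr[i] == arr[i - 1] + 1:
--             curr += 1
--             maxi= max(maxi, curr)
--         else:
--             curr= 1
--     return maxi
-- ===== SOURCE B (Python) =====
-- def longest_consecutive_in_place(arr):
--     boundaries = [i for i in range(1, len(arr)) if arr[i] != arr[i - 1] + 1]
--     cuts = [0] + boundaries + [len(arr)]
--     seg_lengths = [cuts[j + 1] - cuts[j] for j in range(len(cuts) - 1)]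
--     return max([1] + seg_lengths)
-- ===== Notes on version B (the rewrite author's own statement) =====
-- stated objective: alternative
-- what changed: The incremental running-counter/running-max loop is replaced by a two-phase computation: collect the boundary indices where the +1 chain breaks, form cut points, and take the maximum of the segment-length differences (seeded with 1).
import Mathlib
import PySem

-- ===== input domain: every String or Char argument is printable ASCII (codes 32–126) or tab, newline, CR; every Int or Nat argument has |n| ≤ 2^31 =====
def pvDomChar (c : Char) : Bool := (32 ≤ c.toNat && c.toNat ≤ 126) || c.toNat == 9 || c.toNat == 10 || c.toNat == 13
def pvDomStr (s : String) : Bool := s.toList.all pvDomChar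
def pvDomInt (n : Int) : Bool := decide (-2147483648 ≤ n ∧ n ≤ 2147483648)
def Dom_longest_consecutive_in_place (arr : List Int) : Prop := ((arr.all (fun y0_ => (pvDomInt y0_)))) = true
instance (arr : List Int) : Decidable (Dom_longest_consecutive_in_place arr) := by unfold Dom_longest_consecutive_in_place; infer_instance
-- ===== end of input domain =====

-- B replaces A's running-counter loop by a boundaries-then-segment-lengths two-phase computation (alternative decomposition, same cost).


-- ===== PORT A =====
def longest_consecutive_in_place (arr : List Int) : Int :=
  let st := (PySem.List.pyRange 1 (PySem.List.len arr) 1).foldl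
    (fun (s : Int × Int) i =>
      if PySem.List.pyGetD arr i 0 == PySem.List.pyGetD arr (i - 1) 0 + 1 then
        let curr := s.2 + 1
        (max s.1 curr, curr)
      else (s.1, 1)) (1, 1)
  st.1

-- ===== PORT B =====
def longest_consecutive_in_place_alt (arr : List Int) : Int :=
  let boundaries := (PySem.List.pyRange 1 (PySem.List.len arr) 1).filter
    (fun i => !(PySem.List.pyGetD arr i 0 == PySem.List.pyGetD arr (i - 1) 0 + 1))
  let cuts := [0] ++ boundaries ++ [PySem.List.len arr]
  let seg_lengths := (PySem.List.pyRange 0 (PySem.List.len cuts - 1) 1).map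
    (fun j => PySem.List.pyGetD cuts (j + 1) 0 - PySem.List.pyGetD cuts j 0)
  (PySem.List.max? ((1 : Int) :: seg_lengths) (fun y => y)).getD 1

-- ===== PRECONDITION & SPEC =====
def Spec_longest_consecutive_in_place (arr : List Int) (out : Int) : Prop := out = longest_consecutive_in_place_alt arr
instance (arr : List Int) (out : Int) : Decidable (Spec_longest_consecutive_in_place arr out) := by unfold Spec_longest_consecutive_in_place; infer_instance

-- ===== CLAIM (what is proved, stated in full; the proofs are below) =====
def Claim_equal_longest_consecutive_in_place : Prop := ∀ (arr : List Int), Dom_longest_consecutive_in_place arr → Spec_longest_consecutive_in_place arr (longest_consecutive_in_place arr)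

-- ===== LEMMAS AND PROOFS =====

-- A's loop state after processing indices 1..k-1
def pvLoop (arr : List Int) (k : Nat) : Int × Int :=
  (PySem.List.pyRange 1 (k : Int) 1).foldl
    (fun (s : Int × Int) i =>
      if PySem.List.pyGetD arr i 0 == PySem.List.pyGetD arr (i - 1) 0 + 1 then
        (max s.1 (s.2 + 1), s.2 + 1)
      else (s.1, 1)) (1, 1)

-- B's boundaries restricted to indices < k
def pvBd (arr : List Int) (k : Nat) : List Int :=
  (PySem.List.pyRange 1 (k : Int) 1).filter
    (fun i => !(PySem.List.pyGetD arr i 0 == PySem.List.pyGetD arr (i - 1) 0 + 1))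

-- differences of consecutive elements
def pvDif : List Int → List Int
  | a :: b :: t => (b - a) :: pvDif (b :: t)
  | _ => []

def pvLastCut (arr : List Int) (k : Nat) : Int := ((pvBd arr k).getLast?).getD 0

def pvBv (arr : List Int) (k : Nat) : Int :=
  (pvDif ([0] ++ pvBd arr k ++ [(k : Int)])).foldl max 1

lemma pvDif_append_last (c : List Int) (h : c ≠ []) (e : Int) :
    pvDif (c ++ [e]) = pvDif c ++ [e - (c.getLast?).getD 0] := by
  induction c with
  | nil => simp at h
  | cons a t ih =>
    cases t with
    | nil => simp [pvDif]
    | cons b t' =>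
      have := ih (by simp)
      simp only [List.cons_append, pvDif] at this ⊢
      rw [this]
      simp [List.getLast?_cons_cons]

lemma pvSegs_nat (c : List Int) :
    (List.range (c.length - 1)).map (fun k => c.getD (k + 1) 0 - c.getD k 0) = pvDif c := by
  induction c with
  | nil => simp [pvDif]
  | cons a t ih =>
    cases t with
    | nil => simp [pvDif]
    | cons b t' =>
      have hr : (a :: b :: t').length - 1 = ((b :: t').length - 1) + 1 := by simp
      rw [hr, List.range_succ_eq_map]
      simp only [List.map_cons, List.map_map, pvDif]
      congr 1

lemma pvSegs_eq_dif (c : List Int) (h : c ≠ []) :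
    (PySem.List.pyRange 0 (PySem.List.len c - 1) 1).map
      (fun j => PySem.List.pyGetD c (j + 1) 0 - PySem.List.pyGetD c j 0) = pvDif c := by
  have hlen : (PySem.List.len c - 1) = ((c.length - 1 : Nat) : Int) := by
    cases c with
    | nil => simp at h
    | cons a t => simp only [PySem.List.len_eq, List.length_cons]; push_cast; omega
  rw [hlen, PySem.List.pyRange_one]
  simp only [sub_zero, Int.toNat_natCast, zero_add, List.map_map]
  rw [← pvSegs_nat c]
  apply List.map_congr_left
  intro k _
  have h1 : ((k : Int) + 1) = ((k + 1 : Nat) : Int) := by push_cast; ring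
  simp only [Function.comp, h1, PySem.List.pyGetD_natCast]

lemma pvGetLast0 (l : List Int) : (((0 : Int) :: l).getLast?).getD 0 = (l.getLast?).getD 0 := by
  cases l with
  | nil => simp
  | cons a t => rw [List.getLast?_cons_cons]

lemma pvBv_decomp (arr : List Int) (k : Nat) :
    pvBv arr k = max ((pvDif ([0] ++ pvBd arr k)).foldl max 1) ((k : Int) - pvLastCut arr k) := by
  unfold pvBv
  rw [show [0] ++ pvBd arr k ++ [(k : Int)] = ([0] ++ pvBd arr k) ++ [(k : Int)] from by simp,
      pvDif_append_last _ (by simp)]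
  rw [List.foldl_append]
  simp only [List.foldl_cons, List.foldl_nil, List.singleton_append, pvLastCut, pvGetLast0]

lemma pvOne_le_foldl_max (l : List Int) : (1 : Int) ≤ l.foldl max 1 :=
  (PySem.List.le_foldl_max l 1).1

-- main loop invariant: A's state after indices 1..k is (B's value for the prefix, current run length)
lemma pvInvariant (arr : List Int) (k : Nat) :
    pvLoop arr (k + 1) = (pvBv arr (k + 1), ((k + 1 : Nat) : Int) - pvLastCut arr (k + 1)) := by
  induction k with
  | zero =>
    have h : ((0 + 1 : Nat) : Int) = 1 := by norm_num
    simp [pvLoop, pvBv, pvBd, pvLastCut, pvDif, h, PySem.List.pyRange_one_eq_nil (le_refl 1)]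
  | succ k ih =>
    have hcast : ((k + 1 + 1 : Nat) : Int) = ((k + 1 : Nat) : Int) + 1 := by push_cast; ring
    have hsplit : PySem.List.pyRange 1 ((k + 1 + 1 : Nat) : Int) 1
        = PySem.List.pyRange 1 ((k + 1 : Nat) : Int) 1 ++ [((k + 1 : Nat) : Int)] := by
      rw [hcast]
      exact PySem.List.pyRange_one_succ_right (by push_cast; omega)
    have hbd : pvBd arr (k + 1 + 1) = pvBd arr (k + 1) ++
        (if !(PySem.List.pyGetD arr ((k + 1 : Nat) : Int) 0
              == PySem.List.pyGetD arr (((k + 1 : Nat) : Int) - 1) 0 + 1)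
         then [((k + 1 : Nat) : Int)] else []) := by
      unfold pvBd
      rw [hsplit, List.filter_append]
      simp only [List.filter_cons, List.filter_nil]
    by_cases hc : (PySem.List.pyGetD arr ((k + 1 : Nat) : Int) 0
        == PySem.List.pyGetD arr (((k + 1 : Nat) : Int) - 1) 0 + 1) = true
    · -- consecutive step: boundaries unchanged, running segment grows by one
      have hbd' : pvBd arr (k + 1 + 1) = pvBd arr (k + 1) := by
        rw [hbd, hc]; simp
      have hlc : pvLastCut arr (k + 1 + 1) = pvLastCut arr (k + 1) := by
        unfold pvLastCut; rw [hbd']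
      have hloop : pvLoop arr (k + 1 + 1)
          = (max (pvLoop arr (k + 1)).1 ((pvLoop arr (k + 1)).2 + 1), (pvLoop arr (k + 1)).2 + 1) := by
        unfold pvLoop
        rw [hsplit, List.foldl_append]
        simp only [List.foldl_cons, List.foldl_nil]
        rw [if_pos hc]
      rw [hloop, ih]
      have hM : pvBv arr (k + 1 + 1)
          = max ((pvDif ([0] ++ pvBd arr (k + 1))).foldl max 1)
                (((k + 1 + 1 : Nat) : Int) - pvLastCut arr (k + 1)) := by
        rw [pvBv_decomp, hbd', hlc]
      rw [hM, pvBv_decomp, hlc, Prod.mk.injEq]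
      have hd : ((k + 1 : Nat) : Int) - pvLastCut arr (k + 1) + 1
          = ((k + 1 + 1 : Nat) : Int) - pvLastCut arr (k + 1) := by push_cast; ring
      refine ⟨?_, hd⟩
      rw [hd, max_assoc]
      congr 1
      exact max_eq_right (by push_cast; omega)
    · -- break step: a new boundary k+1 is recorded, running segment restarts at 1
      have hc' : (!(PySem.List.pyGetD arr ((k + 1 : Nat) : Int) 0
          == PySem.List.pyGetD arr (((k + 1 : Nat) : Int) - 1) 0 + 1)) = true := by
        simp only [Bool.not_eq_true'] at hc ⊢
        exact Bool.eq_false_iff.mpr hc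
      have hbd' : pvBd arr (k + 1 + 1) = pvBd arr (k + 1) ++ [((k + 1 : Nat) : Int)] := by
        rw [hbd, hc', if_pos rfl]
      have hlc : pvLastCut arr (k + 1 + 1) = ((k + 1 : Nat) : Int) := by
        unfold pvLastCut; rw [hbd', List.getLast?_concat, Option.getD_some]
      have hloop : pvLoop arr (k + 1 + 1) = ((pvLoop arr (k + 1)).1, 1) := by
        unfold pvLoop
        rw [hsplit, List.foldl_append]
        simp only [List.foldl_cons, List.foldl_nil]
        rw [if_neg hc]
      rw [hloop, ih]
      have hM : pvBv arr (k + 1 + 1)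
          = max (pvBv arr (k + 1)) (((k + 1 + 1 : Nat) : Int) - ((k + 1 : Nat) : Int)) := by
        rw [pvBv_decomp, hlc]
        congr 1
        unfold pvBv
        rw [hbd', ← List.append_assoc]
      rw [hM, Prod.mk.injEq]
      constructor
      · show pvBv arr (k + 1) = max (pvBv arr (k + 1)) (((k + 1 + 1 : Nat) : Int) - ((k + 1 : Nat) : Int))
        rw [show (((k + 1 + 1 : Nat) : Int) - ((k + 1 : Nat) : Int)) = 1 from by push_cast; ring]
        exact (max_eq_left (pvOne_le_foldl_max (pvDif ([0] ++ pvBd arr (k + 1) ++ [((k + 1 : Nat) : Int)])))).symm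
      · rw [hlc]; push_cast; ring

-- ===== VERDICT (by name: the statement is the Claim_ definition above) =====
theorem longest_consecutive_in_place_spec : Claim_equal_longest_consecutive_in_place := by
  intro arr _
  unfold Spec_longest_consecutive_in_place longest_consecutive_in_place longest_consecutive_in_place_alt
  cases harr : arr with
  | nil => decide
  | cons a t =>
    have hn : arr.length = t.length + 1 := by rw [harr]; simp
    have hlen : PySem.List.len arr = ((t.length + 1 : Nat) : Int) := by
      rw [PySem.List.len_eq, hn]
    rw [← harr, hlen]
    show (pvLoop arr (t.length + 1)).1 =
      (PySem.List.max? ((1 : Int) ::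
        (PySem.List.pyRange 0
          (PySem.List.len ([0] ++ pvBd arr (t.length + 1) ++ [((t.length + 1 : Nat) : Int)]) - 1) 1).map
          (fun j =>
            PySem.List.pyGetD ([0] ++ pvBd arr (t.length + 1) ++ [((t.length + 1 : Nat) : Int)]) (j + 1) 0 -
            PySem.List.pyGetD ([0] ++ pvBd arr (t.length + 1) ++ [((t.length + 1 : Nat) : Int)]) j 0))
        (fun y => y)).getD 1
    rw [pvSegs_eq_dif _ (by simp), PySem.List.max?_id_cons, Option.getD_some]
    show (pvLoop arr (t.length + 1)).1 = pvBv arr (t.length + 1)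
    rw [pvInvariant]
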